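-- pv_equiv track=rewrite | github.com/jiwon1027/code_backjoon | backjoon/1802.py | check
-- ===== SOURCE A (Python) =====
-- def check(paper):
--     N = len(paper)
--     if N == 1:
--         return True
--     mid = N//2
--     for i in range(mid):
--         if paper[i] == paper[-i - 1]:
--             return False
--     return check(paper[:mid])
-- ===== SOURCE B (Python) =====
-- def check(paper):
--     n = len(paper)
--     while n > 1:
--         mid = n // 2
--         for i in range(mid):
--             if paper[i] == paper[n - 1 - i]:
--                 return False
--         n = mid
--     return True
-- ===== Notes on version B (the rewrite author's own statement) =====
-- stated objective: simpler
-- what changed: Replaces the tail recursion on slice copies with an iterative while-loop over a shrinking length n, indexing the original string directly, so no intermediate prefix strings are built.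
import Mathlib
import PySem

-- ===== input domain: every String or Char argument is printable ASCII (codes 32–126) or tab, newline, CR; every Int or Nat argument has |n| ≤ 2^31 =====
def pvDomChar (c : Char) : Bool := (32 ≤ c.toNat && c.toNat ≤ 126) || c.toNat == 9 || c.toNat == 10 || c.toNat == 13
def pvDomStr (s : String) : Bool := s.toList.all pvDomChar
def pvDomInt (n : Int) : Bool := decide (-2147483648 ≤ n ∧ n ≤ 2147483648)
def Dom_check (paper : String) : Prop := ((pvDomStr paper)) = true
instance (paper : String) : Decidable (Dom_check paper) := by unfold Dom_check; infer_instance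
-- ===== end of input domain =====

-- B replaces A's tail recursion on slice copies by an iterative loop over a shrinking
-- length n indexing the original string (simpler; no prefix copies). On "" A recurses
-- forever (RecursionError) while B returns true — excluded by Pre_check.

-- ===== PORT A =====
-- literal port of A on the character list; on the empty list Python recurses forever
-- (the empty loop then `check(paper[:0])` on the same input), which is outside Pre_check:
-- the port returns true there so that it is total.
def checkA (cs : List Char) : Bool :=
  if cs.length = 1 then true
  else if cs.length = 0 then true  -- Python diverges here (outside Pre_check)
  else
    let mid := cs.length / 2
    if (PySem.List.pyRange 0 (mid : Int) 1).any
        (fun i => PySem.List.pyGetD cs i 'a' == PySem.List.pyGetD cs (-i - 1) 'a') then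
      false
    else
      checkA (PySem.List.slice cs none (some (mid : Int)))
termination_by cs.length
decreasing_by
  simp only [PySem.List.slice_to_natCast, List.length_take]
  omega

def check (paper : String) : Bool := checkA paper.toList

-- ===== PORT B =====
def checkBLoop (cs : List Char) (n : Nat) : Bool :=
  if 1 < n then
    let mid := n / 2
    if (List.range mid).any (fun i => cs[i]? == cs[n - 1 - i]?) then false
    else checkBLoop cs mid
  else true
termination_by n
decreasing_by omega

def check_alt (paper : String) : Bool := checkBLoop paper.toList paper.toList.length

-- ===== PRECONDITION & SPEC =====
-- Pre_ excludes only the empty string, on which A recurses forever (RecursionError).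
def Pre_check (paper : String) : Prop := paper ≠ ""
instance (paper : String) : Decidable (Pre_check paper) := by unfold Pre_check; infer_instance
def pvWitness_check : String := "abba"

def Spec_check (paper : String) (out : Bool) : Prop := out = check_alt paper
instance (paper : String) (out : Bool) : Decidable (Spec_check paper out) := by unfold Spec_check; infer_instance

-- ===== CLAIM =====
def Claim_equal_check : Prop := ∀ (paper : String), Dom_check paper → Pre_check paper → Spec_check paper (check paper)

-- ===== LEMMAS AND PROOFS =====

lemma any_congr_mem {α : Type} {l : List α} {p q : α → Bool}
    (h : ∀ x ∈ l, p x = q x) : l.any p = l.any q := by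
  induction l with
  | nil => rfl
  | cons a l ih =>
    simp only [List.any_cons, h a (List.mem_cons_self), ih (fun x hx => h x (List.mem_cons_of_mem a hx))]

-- the pair comparison at one level, pointwise: A on the prefix = B on the original
lemma pred_eq (cs : List Char) (n i : Nat) (hn : n ≤ cs.length) (hi : i < n) :
    (PySem.List.pyGetD (cs.take n) ((i : Int)) 'a'
        == PySem.List.pyGetD (cs.take n) (-(i : Int) - 1) 'a')
      = (cs[i]? == cs[n - 1 - i]?) := by
  have hilen : i < cs.length := lt_of_lt_of_le hi hn
  have hlen : (cs.take n).length = n := by simp [List.length_take]; omega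
  have h1 : PySem.List.pyGetD (cs.take n) ((i : Int)) 'a' = cs[i] := by
    rw [PySem.List.pyGetD_natCast]
    rw [List.getD_eq_getElem?_getD, List.getElem?_take_of_lt hi]
    simp [List.getElem?_eq_getElem hilen]
  have hk : -(i : Int) - 1 = -(((i + 1 : Nat) : Int)) := by push_cast; ring
  have h2 : PySem.List.pyGetD (cs.take n) (-(i : Int) - 1) 'a' = cs[n - 1 - i]'(by omega) := by
    rw [hk, PySem.List.pyGetD_neg_natCast (cs.take n) (i + 1) 'a' (by omega) (by omega)]
    have : (cs.take n).length - (i + 1) = n - 1 - i := by omega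
    simp only [this]
    rw [List.getElem_take]
  rw [h1, h2, List.getElem?_eq_getElem hilen, List.getElem?_eq_getElem (by omega : n - 1 - i < cs.length)]
  rfl

-- main invariant: A on the length-n prefix equals B's loop at counter n
lemma key (cs : List Char) : ∀ n, 1 ≤ n → n ≤ cs.length → checkA (cs.take n) = checkBLoop cs n := by
  intro n
  induction n using Nat.strong_induction_on with
  | _ n ih =>
    intro h1 hle
    have hlen : (cs.take n).length = n := by simp [List.length_take]; omega
    rw [checkA, checkBLoop, hlen]
    by_cases hn1 : n = 1
    · simp [hn1]
    · have h2 : 1 < n := by omega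
      simp only [hn1, if_neg, if_pos h2, if_neg (by omega : ¬ n = 0)]
      have hany :
          (PySem.List.pyRange 0 ((n / 2 : Nat) : Int) 1).any
              (fun i => PySem.List.pyGetD (cs.take n) i 'a'
                  == PySem.List.pyGetD (cs.take n) (-i - 1) 'a')
            = (List.range (n / 2)).any (fun i => cs[i]? == cs[n - 1 - i]?) := by
        rw [PySem.List.pyRange_one]
        simp only [Int.sub_zero, Int.toNat_natCast, List.any_map]
        apply any_congr_mem
        intro i hi
        have hi' : i < n / 2 := List.mem_range.mp hi
        simp only [Function.comp_apply, zero_add]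
        exact pred_eq cs n i hle (by omega)
      rw [hany]
      by_cases hb : (List.range (n / 2)).any (fun i => cs[i]? == cs[n - 1 - i]?) = true
      · simp [hb]
      · simp only [hb, if_neg, Bool.false_eq_true, if_false]
        have hslice : PySem.List.slice (cs.take n) none (some ((n / 2 : Nat) : Int))
            = cs.take (n / 2) := by
          rw [PySem.List.slice_to_natCast, List.take_take]
          congr 1; omega
        rw [hslice]
        exact ih (n / 2) (by omega) (by omega) (by omega)

-- ===== VERDICT =====
theorem check_spec : Claim_equal_check := by
  intro paper _ hpre
  unfold Spec_check check check_alt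
  have hne : paper.toList ≠ [] := by
    intro h
    apply hpre
    have := congrArg String.ofList h
    simpa using this
  have h1 : 1 ≤ paper.toList.length := by
    cases h : paper.toList with
    | nil => exact absurd h hne
    | cons a l => simp [h]
  have := key paper.toList paper.toList.length h1 le_rfl
  rwa [List.take_length] at this
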